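-- pv_equiv track=rewrite | github.com/davidbrownell/Common_Environment_v2 | Libraries/Python/CommonEnvironment/v1.0/CommonEnvironment/TypeInfo/IntTypeInfo.py | PythonItemRegularExpressionStringsImpl
-- ===== SOURCE A (Python) =====
-- def PythonItemRegularExpressionStringsImpl(min, max):
--     patterns = []
--
--     if min == None or min < 0:
--         patterns.append('-')
--
--         if max == None or max > 0:
--             patterns.append('?')
--
--     if min == None or max == None:
--         patterns.append('+')
--     else:
--         value = 10
--         count = 1
--
--         while True:
--             if ( (min == None or min >= -value) and
--                  (max == None or max <= value)
--                ):
--                 break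
--
--             value *= 10
--             count += 1
--
--         patterns.append("{%d}" % count)
--
--     return ''.join(patterns)
-- ===== SOURCE B (Python) =====
-- def PythonItemRegularExpressionStringsImpl(min, max):
--     sign = ''
--     if min is None or min < 0:
--         sign = '-?' if (max is None or max > 0) else '-'
--     if min is None or max is None:
--         return sign + '+'
--     bound = max if max >= -min else -min
--     count = 1 if bound <= 10 else len(str(bound - 1))
--     return sign + '{%d}' % count
-- ===== Notes on version B (the rewrite author's own statement) =====
-- stated objective: simpler
-- what changed: The multiply-by-10 while-loop that counts digits is replaced by a closed-form width computation: bound = max(max, -min), count = 1 if bound <= 10 else len(str(bound - 1)); the sign/'?'/'+' prefix logic is kept.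
import Mathlib
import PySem

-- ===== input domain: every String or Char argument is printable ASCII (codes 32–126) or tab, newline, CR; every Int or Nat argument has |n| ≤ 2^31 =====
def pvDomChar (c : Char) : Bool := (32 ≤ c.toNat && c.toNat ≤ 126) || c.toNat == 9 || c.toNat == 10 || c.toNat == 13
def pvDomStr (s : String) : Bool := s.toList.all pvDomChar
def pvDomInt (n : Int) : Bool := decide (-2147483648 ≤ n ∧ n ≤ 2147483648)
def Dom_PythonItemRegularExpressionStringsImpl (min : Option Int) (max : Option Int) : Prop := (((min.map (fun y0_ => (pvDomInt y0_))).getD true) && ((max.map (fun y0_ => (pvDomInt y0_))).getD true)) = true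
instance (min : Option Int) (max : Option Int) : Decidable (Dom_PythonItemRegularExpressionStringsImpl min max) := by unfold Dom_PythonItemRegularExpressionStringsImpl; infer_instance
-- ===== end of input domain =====

-- B replaces A's multiply-by-10 counting loop with a closed-form digit-width computation
-- (count = 1 if bound <= 10 else len(str(bound-1))); objective: simpler (no loop), same observable output.


-- ===== PORT A =====
-- A's `while True` loop: value *= 10, count += 1 until (min >= -value and max <= value).
-- The fuel argument only makes the recursion total; 64 iterations are never exhausted on Dom inputs.
def pvALoop (mn mx : Int) : Nat → Int → Int → Int
  | 0, _, count => count
  | fuel + 1, value, count =>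
    if mn ≥ -value ∧ mx ≤ value then count
    else pvALoop mn mx fuel (value * 10) (count + 1)

def PythonItemRegularExpressionStringsImpl (min : Option Int) (max : Option Int) : String :=
  let patterns : List String := []
  let patterns :=
    if (min.casesOn true (fun m => decide (m < 0))) = true then
      let patterns := patterns ++ ["-"]
      if (max.casesOn true (fun M => decide (M > 0))) = true then
        patterns ++ ["?"]
      else patterns
    else patterns
  let patterns :=
    -- `if min == None or max == None: append '+' else: <loop>` — nested casesOn, '+' in both None branches
    min.casesOn (patterns ++ ["+"]) (fun m =>
      max.casesOn (patterns ++ ["+"]) (fun M =>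
        let count := pvALoop m M 64 10 1
        patterns ++ ["{" ++ PySem.Int.toStr count ++ "}"]))
  PySem.Str.join "" patterns

-- ===== PORT B =====
def PythonItemRegularExpressionStringsImpl_alt (min : Option Int) (max : Option Int) : String :=
  let sign :=
    if (min.casesOn true (fun m => decide (m < 0))) = true then
      if (max.casesOn true (fun M => decide (M > 0))) = true then "-?" else "-"
    else ""
  min.casesOn (sign ++ "+") (fun m =>
    max.casesOn (sign ++ "+") (fun M =>
      let bound := if M ≥ -m then M else -m
      let count : Int := if bound ≤ 10 then 1 else PySem.Str.len (PySem.Int.toStr (bound - 1))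
      sign ++ "{" ++ PySem.Int.toStr count ++ "}"))

-- ===== PRECONDITION & SPEC =====
def Spec_PythonItemRegularExpressionStringsImpl (min : Option Int) (max : Option Int) (out : String) : Prop := out = PythonItemRegularExpressionStringsImpl_alt min max
instance (min : Option Int) (max : Option Int) (out : String) : Decidable (Spec_PythonItemRegularExpressionStringsImpl min max out) := by unfold Spec_PythonItemRegularExpressionStringsImpl; infer_instance

-- ===== CLAIM (what is proved, stated in full; the proofs are below) =====
def Claim_equal_PythonItemRegularExpressionStringsImpl : Prop := ∀ (min : Option Int) (max : Option Int), Dom_PythonItemRegularExpressionStringsImpl min max → Spec_PythonItemRegularExpressionStringsImpl min max (PythonItemRegularExpressionStringsImpl min max)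

-- ===== LEMMAS AND PROOFS =====

-- exact length of Nat.toDigits base 10
lemma pv_toDigitsCore_len : ∀ (f n : Nat), n < f →
    (Nat.toDigitsCore 10 f n []).length = Nat.log 10 n + 1 := by
  intro f
  induction f with
  | zero => intro n h; omega
  | succ f ih =>
    intro n h
    simp only [Nat.toDigitsCore]
    by_cases h10 : n / 10 = 0
    · have : n < 10 := by omega
      simp [h10, Nat.log_eq_zero_iff, this]
    · have hn : 10 ≤ n := by
        by_contra hc
        exact h10 (Nat.div_eq_of_lt (by omega))
      rw [if_neg h10, Nat.toDigitsCore_lens_eq, ih (n / 10) (by omega)]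
      rw [Nat.log_div_base 10 n]
      have : 1 ≤ Nat.log 10 n := Nat.log_pos (by norm_num) hn
      omega

lemma pv_toDigits_len (n : Nat) : (Nat.toDigits 10 n).length = Nat.log 10 n + 1 := by
  simpa [Nat.toDigits] using pv_toDigitsCore_len (n + 1) n (by omega)

-- A's loop returns count + k when k is the least number of times value must be
-- multiplied by 10 before the break condition holds.
lemma pv_aLoop_eq (mn mx : Int) : ∀ (k fuel : Nat) (v c : Int),
    k ≤ fuel →
    (∀ j : Nat, j < k → ¬ (mn ≥ -(v * 10 ^ j) ∧ mx ≤ v * 10 ^ j)) →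
    (mn ≥ -(v * 10 ^ k) ∧ mx ≤ v * 10 ^ k) →
    pvALoop mn mx fuel v c = c + k := by
  intro k
  induction k with
  | zero =>
    intro fuel v c _ _ hbrk
    simp only [pow_zero, mul_one] at hbrk
    cases fuel with
    | zero => simp [pvALoop]
    | succ f => simp [pvALoop, hbrk.1, hbrk.2]
  | succ k ih =>
    intro fuel v c hk hlt hbrk
    cases fuel with
    | zero => omega
    | succ f =>
      have h0 := hlt 0 (by omega)
      simp only [pow_zero, mul_one] at h0
      have : ¬ (mn ≥ -v ∧ mx ≤ v) := h0
      simp only [pvALoop, if_neg this]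
      have hrec := ih f (v * 10) (c + 1) (by omega)
        (by intro j hj
            have := hlt (j + 1) (by omega)
            simpa [pow_succ, mul_comm, mul_left_comm, mul_assoc] using this)
        (by have := hbrk
            simpa [pow_succ, mul_comm, mul_left_comm, mul_assoc] using this)
      rw [hrec]; push_cast; ring

theorem PythonItemRegularExpressionStringsImpl_spec : Claim_equal_PythonItemRegularExpressionStringsImpl := by
  intro mn mx hdom
  unfold Spec_PythonItemRegularExpressionStringsImpl
  match mn, mx with
  | none, none => decide
  | none, some M =>
      by_cases hM : M > 0 <;>
        simp [PythonItemRegularExpressionStringsImpl, PythonItemRegularExpressionStringsImpl_alt, hM] <;> decide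
  | some m, none =>
      by_cases hm : m < 0 <;>
        simp [PythonItemRegularExpressionStringsImpl, PythonItemRegularExpressionStringsImpl_alt, hm] <;> decide
  | some m, some M =>
      have hdm : -2147483648 ≤ m ∧ m ≤ 2147483648 ∧ -2147483648 ≤ M ∧ M ≤ 2147483648 := by
        simp [Dom_PythonItemRegularExpressionStringsImpl, pvDomInt] at hdom
        exact ⟨hdom.1.1, hdom.1.2, hdom.2.1, hdom.2.2⟩
      have hcount : pvALoop m M 64 10 1 =
          (if (if M ≥ -m then M else -m) ≤ 10 then (1 : Int)
           else PySem.Str.len (PySem.Int.toStr ((if M ≥ -m then M else -m) - 1))) := by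
        set bound : Int := if M ≥ -m then M else -m with hbdef
        have hb1 : -m ≤ bound := by rw [hbdef]; split <;> omega
        have hb2 : M ≤ bound := by rw [hbdef]; split <;> omega
        have hb3 : bound = M ∨ bound = -m := by rw [hbdef]; split <;> simp
        have hbU : bound ≤ 2147483648 := by rcases hb3 with h | h <;> omega
        by_cases hle : bound ≤ 10
        · rw [if_pos hle]
          have := pv_aLoop_eq m M 0 64 10 1 (by omega) (by omega)
            (by constructor <;> simp <;> omega)
          simpa using this
        · rw [if_neg hle]
          set n : Nat := (bound - 1).toNat with hndef
          have hn10 : 10 ≤ n := by omega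
          have hnb : (n : Int) = bound - 1 := by omega
          set k : Nat := Nat.log 10 n with hkdef
          have hk1 : 1 ≤ k := Nat.log_pos (by norm_num) hn10
          have hkle : 10 ^ k ≤ n := Nat.pow_log_le_self 10 (by omega)
          have hklt : n < 10 ^ (k + 1) := Nat.lt_pow_succ_log_self (by norm_num) n
          have hk64 : k ≤ 64 := by
            have : n < 10 ^ 10 := by omega
            have := Nat.log_lt_of_lt_pow (by omega) this
            omega
          -- RHS value
          have hrhs : PySem.Str.len (PySem.Int.toStr (bound - 1)) = (k : Int) + 1 := by
            rw [PySem.Str.len_eq, PySem.Int.toList_toStr]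
            have hpos : ¬ (bound - 1 < 0) := by omega
            simp only [PySem.Int.toChars, if_neg hpos]
            have : (bound - 1).toNat = n := by omega
            rw [this, pv_toDigits_len]
            push_cast
            ring
          rw [hrhs]
          -- LHS via the loop lemma
          have hloop := pv_aLoop_eq m M k 64 10 1 hk64
            (by intro j hj hcon
                have hjk : j + 1 ≤ k := by omega
                have hpw : (10 : Int) ^ (j + 1) ≤ (10 : Int) ^ k := by
                  apply pow_le_pow_right₀ (by norm_num) hjk
                have hkn : ((10 : Nat) ^ k : Int) ≤ (n : Int) := by exact_mod_cast hkle
                push_cast at hkn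
                have hbig : (10 : Int) * 10 ^ j < bound := by
                  have : (10 : Int) ^ (j + 1) = 10 * 10 ^ j := by ring
                  omega
                rcases hcon with ⟨h1, h2⟩
                rcases hb3 with h | h <;> omega)
            (by have hup : (bound : Int) ≤ 10 * 10 ^ k := by
                  have : ((n : Int)) < ((10 : Nat) ^ (k + 1) : Int) := by exact_mod_cast hklt
                  push_cast at this
                  have hpow : (10 : Int) ^ (k + 1) = 10 * 10 ^ k := by ring
                  omega
                constructor <;> omega)
          rw [hloop]
          omega
      -- assemble the strings
      simp only [PythonItemRegularExpressionStringsImpl, PythonItemRegularExpressionStringsImpl_alt]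
      rw [hcount]
      by_cases hm : m < 0 <;> by_cases hM : M > 0 <;>
        simp only [hm, hM, decide_true, decide_false, if_true, List.nil_append,
          List.cons_append] <;>
        apply String.toList_inj.mp <;>
        simp [PySem.Str.join, PySem.Chars.join, List.intercalate]
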